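-- pv_equiv track=rewrite | github.com/Arsen1302/Code-copy-detector | TestData/solutions/problem_447_2.py | solution_447_2
-- ===== SOURCE A (Python) =====
-- from typing import List
--
-- def solution_447_2(nums: List[int]) -> int:
--     largest = max(nums)
--     for idx, val in enumerate(nums):
--         if val==largest:
--             new_idx = idx
--             continue
--         if val*2>largest: return -1
--     return new_idx
-- ===== SOURCE B (Python) =====
-- from typing import List
--
-- def solution_447_2(nums: List[int]) -> int:
--     largest = max(nums)
--     others = [x for x in nums if x != largest]
--     if others and 2 * max(others) > largest:
--         return -1
--     return len(nums) - 1 - nums[::-1].index(largest)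
-- ===== Notes on version B (the rewrite author's own statement) =====
-- stated objective: simpler
-- what changed: Replaces A's single fused short-circuiting scan (tracking new_idx and bailing out mid-loop) with a direct decomposition: filter out the maxima, compare twice the second-distinct maximum against the maximum, and look up the last index of the maximum via a reversed-list index.
import Mathlib
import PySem

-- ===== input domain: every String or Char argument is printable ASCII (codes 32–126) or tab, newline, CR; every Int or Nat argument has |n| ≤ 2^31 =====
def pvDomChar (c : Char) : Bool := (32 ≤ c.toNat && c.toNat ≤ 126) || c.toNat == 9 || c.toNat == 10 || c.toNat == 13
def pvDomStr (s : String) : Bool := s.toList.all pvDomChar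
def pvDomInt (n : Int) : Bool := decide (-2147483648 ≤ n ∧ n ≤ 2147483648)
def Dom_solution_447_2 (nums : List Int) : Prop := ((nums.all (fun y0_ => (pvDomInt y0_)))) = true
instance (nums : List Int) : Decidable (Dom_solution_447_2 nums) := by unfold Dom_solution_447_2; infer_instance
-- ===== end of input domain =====

-- B replaces A's fused short-circuiting scan by: filter out the maxima, compare 2*max(others)
-- with the maximum, and find the last index of the maximum via a reversed-list index (objective: simpler).

-- ===== PORT A =====
-- the for-loop of A: state is the (possibly still unbound) variable new_idx;
-- at loop end `return new_idx`; the unbound case (getD 0) is unreachable since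
-- largest occurs in nums whenever max() returned.
def pvALoop (largest : Int) : List (Int × Int) → Option Int → Int
  | [], newIdx => newIdx.getD 0
  | (idx, val) :: rest, newIdx =>
    if val = largest then pvALoop largest rest (some idx)
    else if val * 2 > largest then -1
    else pvALoop largest rest newIdx

def solution_447_2 (nums : List Int) : Int :=
  match PySem.List.max? nums (fun x => x) with
  | none => 0   -- max([]) raises ValueError; excluded by Pre_
  | some largest => pvALoop largest (PySem.List.enumerate nums 0) none

-- ===== PORT B =====
def solution_447_2_alt (nums : List Int) : Int :=
  match PySem.List.max? nums (fun x => x) with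
  | none => 0   -- max([]) raises ValueError; excluded by Pre_
  | some largest =>
    let others := nums.filter (fun x => x ≠ largest)
    let lastIdx : Int :=
      (nums.length : Int) - 1 -
        (((PySem.List.index? ((PySem.List.slice? nums none none (-1)).getD []) largest).getD 0 : Nat) : Int)
    match PySem.List.max? others (fun x => x) with
    | some m => if 2 * m > largest then -1 else lastIdx
    | none => lastIdx

-- ===== PRECONDITION & SPEC =====
-- Pre_ excludes only the empty list, on which Python's max([]) raises ValueError.
def Pre_solution_447_2 (nums : List Int) : Prop := nums ≠ []
instance (nums : List Int) : Decidable (Pre_solution_447_2 nums) := by unfold Pre_solution_447_2; infer_instance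
def pvWitness_solution_447_2 : List Int := [3, 1, 3, 0]
def Spec_solution_447_2 (nums : List Int) (out : Int) : Prop := out = solution_447_2_alt nums
instance (nums : List Int) (out : Int) : Decidable (Spec_solution_447_2 nums out) := by unfold Spec_solution_447_2; infer_instance

-- ===== CLAIM (what is proved, stated in full; the proofs are below) =====
def Claim_equal_solution_447_2 : Prop := ∀ (nums : List Int), Dom_solution_447_2 nums → Pre_solution_447_2 nums → Spec_solution_447_2 nums (solution_447_2 nums)

-- ===== LEMMAS AND PROOFS =====

-- A's loop, characterised: it returns -1 iff some element other than largest has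
-- double exceeding largest; otherwise it returns the last index recorded for largest.
theorem pvALoop_spec (largest : Int) (l : List (Int × Int)) (acc : Option Int) :
    pvALoop largest l acc =
      if ∃ p ∈ l, p.2 ≠ largest ∧ largest < p.2 * 2 then -1
      else (l.foldl (fun a p => if p.2 = largest then some p.1 else a) acc).getD 0 := by
  induction l generalizing acc with
  | nil => simp [pvALoop]
  | cons p rest ih =>
    obtain ⟨i, v⟩ := p
    by_cases hv : v = largest
    · subst hv
      have hstep : pvALoop v ((i, v) :: rest) acc = pvALoop v rest (some i) := by
        simp [pvALoop]
      have hcond : (∃ p ∈ (i, v) :: rest, p.2 ≠ v ∧ v < p.2 * 2) ↔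
          ∃ p ∈ rest, p.2 ≠ v ∧ v < p.2 * 2 := by
        constructor
        · rintro ⟨p, hp, hne, hgt⟩
          rcases List.mem_cons.mp hp with rfl | hp'
          · exact absurd rfl hne
          · exact ⟨p, hp', hne, hgt⟩
        · rintro ⟨p, hp, h⟩
          exact ⟨p, List.mem_cons_of_mem _ hp, h⟩
      rw [hstep, ih, List.foldl_cons, if_pos rfl, if_congr hcond rfl rfl]
    · by_cases hb : largest < v * 2
      · have hstep : pvALoop largest ((i, v) :: rest) acc = -1 := by
          simp [pvALoop, hv, hb]
        rw [hstep, if_pos ⟨(i, v), List.mem_cons_self, hv, hb⟩]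
      · have hstep : pvALoop largest ((i, v) :: rest) acc = pvALoop largest rest acc := by
          simp [pvALoop, hv, hb]
        have hcond : (∃ p ∈ (i, v) :: rest, p.2 ≠ largest ∧ largest < p.2 * 2) ↔
            ∃ p ∈ rest, p.2 ≠ largest ∧ largest < p.2 * 2 := by
          constructor
          · rintro ⟨p, hp, hne, hgt⟩
            rcases List.mem_cons.mp hp with rfl | hp'
            · exact absurd hgt hb
            · exact ⟨p, hp', hne, hgt⟩
          · rintro ⟨p, hp, h⟩
            exact ⟨p, List.mem_cons_of_mem _ hp, h⟩
        rw [hstep, ih, List.foldl_cons, if_neg hv, if_congr hcond rfl rfl]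

theorem exists_enumerate (xs : List Int) (s : Int) (P : Int → Prop) :
    (∃ p ∈ PySem.List.enumerate xs s, P p.2) ↔ ∃ x ∈ xs, P x := by
  induction xs generalizing s with
  | nil => simp [PySem.List.enumerate_nil]
  | cons x t ih => simp [PySem.List.enumerate_cons, ih]

-- the last-index fold over enumerate equals (len - 1) minus the reversed-list index
theorem lastIdx_loop (largest : Int) (xs : List Int) :
    (PySem.List.enumerate xs 0).foldl (fun a p => if p.2 = largest then some p.1 else a) none
      = (PySem.List.index? xs.reverse largest).map (fun k => (xs.length : Int) - 1 - (k : Int)) := by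
  induction xs using List.reverseRecOn with
  | nil =>
    simp [PySem.List.enumerate_nil, PySem.List.index?_eq_idxOf?]
  | append_singleton t x ih =>
    rw [PySem.List.enumerate_append, List.foldl_append, ih]
    simp only [List.reverse_append, List.reverse_cons, List.reverse_nil, List.nil_append,
      List.singleton_append]
    by_cases hx : x = largest
    · subst hx
      rw [PySem.List.index?_cons_self]
      simp [PySem.List.enumerate_cons, PySem.List.enumerate_nil]
    · rw [PySem.List.index?_cons_of_ne t.reverse hx]
      cases h : PySem.List.index? t.reverse largest with
      | none =>
        simp [PySem.List.enumerate_cons, PySem.List.enumerate_nil, hx]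
      | some k =>
        simp [PySem.List.enumerate_cons, PySem.List.enumerate_nil, hx]
        omega

theorem pv_main (nums : List Int) (hpre : Pre_solution_447_2 nums) :
    Spec_solution_447_2 nums (solution_447_2 nums) := by
  unfold Spec_solution_447_2 solution_447_2 solution_447_2_alt
  cases hmax : PySem.List.max? nums (fun x => x) with
  | none => exact absurd ((PySem.List.max?_eq_none_iff nums (fun x => x)).mp hmax) hpre
  | some largest =>
    dsimp only
    have hmem : largest ∈ nums := PySem.List.max?_mem hmax
    have hrevmem : largest ∈ nums.reverse := List.mem_reverse.mpr hmem
    obtain ⟨k, hk⟩ := Option.isSome_iff_exists.mp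
      ((PySem.List.index?_isSome_iff nums.reverse largest).mpr hrevmem)
    have hslice : PySem.List.slice? nums none none (-1) = some nums.reverse :=
      PySem.List.slice?_none_none_neg_one nums
    have hkd : ((PySem.List.index? ((PySem.List.slice? nums none none (-1)).getD []) largest).getD 0 : Nat) = k := by
      rw [hslice]
      simp only [Option.getD_some]
      rw [hk]
      rfl
    rw [pvALoop_spec, hkd, lastIdx_loop, hk]
    rw [if_congr (exists_enumerate nums 0 (fun x => x ≠ largest ∧ largest < x * 2)) rfl rfl]
    simp only [Option.pure_def]
    cases hmo : PySem.List.max? (nums.filter (fun x => x ≠ largest)) (fun x => x) with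
    | none =>
      have hfil : nums.filter (fun x => x ≠ largest) = [] :=
        (PySem.List.max?_eq_none_iff _ _).mp hmo
      have hnone : ¬ ∃ x ∈ nums, x ≠ largest ∧ largest < x * 2 := by
        rintro ⟨v, hv, hvl, -⟩
        have hvf : v ∈ nums.filter (fun x => x ≠ largest) :=
          List.mem_filter.mpr ⟨hv, by simp [hvl]⟩
        rw [hfil] at hvf
        simp at hvf
      rw [if_neg hnone]
      simp
    | some m =>
      have hmmem : m ∈ nums.filter (fun x => x ≠ largest) := PySem.List.max?_mem hmo
      obtain ⟨hmnums, hmne⟩ := List.mem_filter.mp hmmem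
      by_cases hgt : 2 * m > largest
      · have htrue : ∃ x ∈ nums, x ≠ largest ∧ largest < x * 2 :=
          ⟨m, hmnums, by simpa using hmne, by omega⟩
        rw [if_pos htrue]
        simp [hgt]
      · have hfalse : ¬ ∃ x ∈ nums, x ≠ largest ∧ largest < x * 2 := by
          rintro ⟨x, hx, hxl, hxgt⟩
          have hxm : x ≤ m :=
            PySem.List.max?_isMax hmo x (List.mem_filter.mpr ⟨hx, by simpa using hxl⟩)
          omega
        rw [if_neg hfalse]
        simp [hgt]

-- ===== VERDICT (by name: the statement is the Claim_ definition above) =====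
theorem solution_447_2_spec : Claim_equal_solution_447_2 := fun nums _ hpre => pv_main nums hpre
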